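-- pv_equiv track=rewrite | github.com/vbianchi/Youtube_Shorts_AI | src/audio_generation/audio_generator.py | optimize_script_for_tts
-- ===== SOURCE A (Python) =====
-- def optimize_script_for_tts(script):
--     """
--     Optimize a script for text-to-speech by adding SSML tags or formatting.
--
--     Args:
--         script (str): The script to optimize
--
--     Returns:
--         str: The optimized script
--     """
--     # This is a simple implementation that could be expanded with more sophisticated SSML
--
--     # Add pauses after sentences
--     script = script.replace(". ", ". <break time='0.3s'/> ")
--     script = script.replace("! ", "! <break time='0.3s'/> ")
--     script = script.replace("? ", "? <break time='0.3s'/> ")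
--
--     # Emphasize questions
--     lines = script.split("\n")
--     for i, line in enumerate(lines):
--         if "?" in line:
--             lines[i] = f"<emphasis level='moderate'>{line}</emphasis>"
--
--     # Wrap in SSML tags
--     optimized_script = "<speak>\n" + "\n".join(lines) + "\n</speak>"
--
--     return optimized_script
-- ===== SOURCE B (Python) =====
-- def optimize_script_for_tts(script):
--     # One-pass character scan: a state machine over the characters inserts the break
--     # tags on the fly, tracks whether the current line has a '?', and closes each
--     # line with the emphasis wrapper when needed. No replace passes, no second loop.
--     BREAK = " <break time='0.3s'/> "
--     out_lines = []
--     buf = []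
--     has_q = False
--     i = 0
--     n = len(script)
--     while i < n:
--         c = script[i]
--         if c == "\n":
--             line = "".join(buf)
--             out_lines.append("<emphasis level='moderate'>" + line + "</emphasis>" if has_q else line)
--             buf = []
--             has_q = False
--             i += 1
--         else:
--             if c == "?":
--                 has_q = True
--             if c in ".!?" and i + 1 < n and script[i + 1] == " ":
--                 buf.append(c + BREAK)
--                 i += 2
--             else:
--                 buf.append(c)
--                 i += 1
--     line = "".join(buf)
--     out_lines.append("<emphasis level='moderate'>" + line + "</emphasis>" if has_q else line)
--     return "<speak>\n" + "\n".join(out_lines) + "\n</speak>"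
-- ===== Notes on version B (the rewrite author's own statement) =====
-- stated objective: alternative
-- what changed: A makes three whole-script replace passes and then a second loop over the split lines to add emphasis; B is a single left-to-right character scan (a small state machine with a line buffer and a has-question flag) that inserts the break tags, closes each line with its emphasis wrapper at the newline, and never rescans the text.
import Mathlib
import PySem

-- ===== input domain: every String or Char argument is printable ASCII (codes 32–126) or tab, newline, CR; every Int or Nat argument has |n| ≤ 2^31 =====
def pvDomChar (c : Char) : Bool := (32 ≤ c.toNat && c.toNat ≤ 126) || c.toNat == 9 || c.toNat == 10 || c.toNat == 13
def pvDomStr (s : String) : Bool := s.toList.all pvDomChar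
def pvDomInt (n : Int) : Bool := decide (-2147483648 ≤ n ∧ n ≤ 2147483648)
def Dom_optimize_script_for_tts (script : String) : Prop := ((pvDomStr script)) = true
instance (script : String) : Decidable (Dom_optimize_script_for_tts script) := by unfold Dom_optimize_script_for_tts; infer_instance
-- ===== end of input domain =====

-- B replaces A's three whole-script replace passes plus a separate emphasis loop by a single
-- left-to-right character scan that inserts break tags, tracks '?', and closes lines as it goes.


-- ===== PORT A =====
def optimize_script_for_tts (script : String) : String :=
  -- script = script.replace(". ", ". <break time='0.3s'/> ") etc., three global passes
  let s1 := PySem.Str.replace script ". " ". <break time='0.3s'/> "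
  let s2 := PySem.Str.replace s1 "! " "! <break time='0.3s'/> "
  let s3 := PySem.Str.replace s2 "? " "? <break time='0.3s'/> "
  -- lines = script.split("\n"); sep is non-empty so split? is some
  let lines := (PySem.Str.split? s3 "\n").getD []
  -- for i, line in enumerate(lines): if "?" in line: lines[i] = "<emphasis ...>" + line + "</emphasis>"
  let lines := lines.map (fun line =>
    if PySem.Str.isIn "?" line then "<emphasis level='moderate'>" ++ line ++ "</emphasis>" else line)
  "<speak>\n" ++ PySem.Str.join "\n" lines ++ "\n</speak>"

-- ===== PORT B =====
-- BREAK = " <break time='0.3s'/> "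
def pvBrk : List Char := (" <break time='0.3s'/> ").toList

-- line = "".join(buf); out_lines.append(wrapped if has_q else line)
def pvFin (buf : List Char) (hq : Bool) : String :=
  if hq then "<emphasis level='moderate'>" ++ String.ofList buf ++ "</emphasis>"
  else String.ofList buf

-- the while loop of Source B: state = remaining chars, buf, has_q; produces out_lines
def pvScan : List Char → List Char → Bool → List String
  | [], buf, hq => [pvFin buf hq]
  | c :: t, buf, hq =>
    if c = '\n' then pvFin buf hq :: pvScan t [] false
    else
      let hq' := hq || decide (c = '?')
      if (c = '.' ∨ c = '!' ∨ c = '?') ∧ t.head? = some ' ' then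
        pvScan (t.drop 1) (buf ++ c :: pvBrk) hq'
      else
        pvScan t (buf ++ [c]) hq'
termination_by l _ _ => l.length
decreasing_by
  · simp
  · simp only [List.length_cons]
    have := List.length_drop (l := t) (i := 1)
    omega
  · simp

def optimize_script_for_tts_alt (script : String) : String :=
  "<speak>\n" ++ PySem.Str.join "\n" (pvScan script.toList [] false) ++ "\n</speak>"

-- ===== PRECONDITION & SPEC =====
def Spec_optimize_script_for_tts (script : String) (out : String) : Prop := out = optimize_script_for_tts_alt script
instance (script : String) (out : String) : Decidable (Spec_optimize_script_for_tts script out) := by unfold Spec_optimize_script_for_tts; infer_instance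

-- ===== CLAIM (what is proved, stated in full; the proofs are below) =====
def Claim_equal_optimize_script_for_tts : Prop := ∀ (script : String), Dom_optimize_script_for_tts script → Spec_optimize_script_for_tts script (optimize_script_for_tts script)

-- ===== LEMMAS AND PROOFS =====

-- Structural (fuel-free) version of PySem.Chars.replace
def pvRep (old new : List Char) : List Char → List Char
  | [] => []
  | c :: t =>
    if old.isPrefixOf (c :: t) then new ++ pvRep old new (t.drop (old.length - 1))
    else c :: pvRep old new t
termination_by l => l.length
decreasing_by
  · simp only [List.length_cons]; have : (List.drop (old.length - 1) t).length = t.length - (old.length-1) := List.length_drop ..; omega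
  · simp

-- Structural (fuel-free) version of PySem.Chars.splitOn
def pvSpl (sep : List Char) : List Char → List (List Char)
  | [] => [[]]
  | c :: t =>
    if sep.isPrefixOf (c :: t) then [] :: pvSpl sep (t.drop (sep.length - 1))
    else (pvSpl sep t).modifyHead (c :: ·)
termination_by l => l.length
decreasing_by
  · simp only [List.length_cons]; have : (List.drop (sep.length - 1) t).length = t.length - (sep.length-1) := List.length_drop ..; omega
  · simp

-- the split is never empty and its head (the first line) is a prefix of the input
theorem pvSpl_head_aux (sep : List Char) (t : List Char) :
    ∃ h tl, pvSpl sep t = h :: tl ∧ h <+: t := by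
  induction t using pvSpl.induct sep with
  | case1 => refine ⟨[], [], ?_, List.nil_prefix⟩; rw [pvSpl]
  | case2 c t hpre ih =>
    rw [pvSpl, if_pos hpre]
    exact ⟨[], _, rfl, List.nil_prefix⟩
  | case3 c t hpre ih =>
    obtain ⟨h1, tl, hh, hp⟩ := ih
    rw [pvSpl, if_neg hpre, hh]
    exact ⟨c :: h1, tl, rfl, List.cons_prefix_cons.mpr ⟨rfl, hp⟩⟩

theorem pvRep_go (old new : List Char) (hold : old ≠ []) :
    ∀ (fuel : Nat) (l acc : List Char), l.length ≤ fuel →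
      PySem.Chars.replace.go old new fuel l acc = acc.reverse ++ pvRep old new l := by
  intro fuel
  induction fuel with
  | zero =>
    intro l acc h
    have : l = [] := List.eq_nil_of_length_eq_zero (Nat.le_zero.mp h)
    subst this
    rw [PySem.Chars.replace.go]; simp [pvRep]
  | succ f ih =>
    intro l acc h
    match l with
    | [] => rw [PySem.Chars.replace.go]; simp [pvRep]; omega
    | c :: t =>
      rw [PySem.Chars.replace.go]
      have hol : 1 ≤ old.length := by
        cases old with
        | nil => exact absurd rfl hold
        | cons a b => simp
      split
      · have hdrop : List.drop old.length (c :: t) = List.drop (old.length - 1) t := by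
          have : old.length = (old.length - 1) + 1 := by omega
          rw [this, List.drop_succ_cons]; simp
        rw [hdrop, ih _ _ (by
          have : (List.drop (old.length - 1) t).length = t.length - (old.length - 1) :=
            List.length_drop ..
          simp only [List.length_cons] at h
          omega)]
        rw [pvRep]
        simp_all
      · rw [ih _ _ (by simp only [List.length_cons] at h; omega), pvRep]
        simp_all

theorem pvRep_eq (s old new : List Char) (hold : old ≠ []) :
    PySem.Chars.replace s old new = pvRep old new s := by
  rw [PySem.Chars.replace]
  simp [List.isEmpty_iff, hold]
  rw [pvRep_go old new hold s.length s [] le_rfl]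
  simp

theorem pvSpl_go (sep : List Char) (hsep : sep ≠ []) :
    ∀ (fuel : Nat) (l cur : List Char) (acc : List (List Char)), l.length < fuel →
      PySem.Chars.splitOn.go sep fuel l cur acc
        = acc.reverse ++ (pvSpl sep l).modifyHead (cur.reverse ++ ·) := by
  intro fuel
  induction fuel with
  | zero => intro l cur acc h; omega
  | succ f ih =>
    intro l cur acc h
    match l with
    | [] => rw [PySem.Chars.splitOn.go]; simp [pvSpl]; omega
    | c :: t =>
      rw [PySem.Chars.splitOn.go]
      have hsl : 1 ≤ sep.length := by
        cases sep with
        | nil => exact absurd rfl hsep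
        | cons a b => simp
      split
      · have hdrop : List.drop sep.length (c :: t) = List.drop (sep.length - 1) t := by
          have : sep.length = (sep.length - 1) + 1 := by omega
          rw [this, List.drop_succ_cons]; simp
        rw [hdrop, ih _ _ _ (by
          have : (List.drop (sep.length - 1) t).length = t.length - (sep.length - 1) :=
            List.length_drop ..
          simp only [List.length_cons] at h
          omega)]
        rw [pvSpl]
        simp_all
        obtain ⟨h1, tl, hh, -⟩ := pvSpl_head_aux sep (List.drop (sep.length - 1) t)
        rw [hh]
        simp
      · rw [ih _ _ _ (by simp only [List.length_cons] at h; omega), pvSpl]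
        simp_all
        obtain ⟨h1, tl, hh, -⟩ := pvSpl_head_aux sep t
        rw [hh]
        simp

theorem pvSpl_eq (s sep : List Char) (hsep : sep ≠ []) :
    PySem.Chars.splitOn s sep = pvSpl sep s := by
  rw [PySem.Chars.splitOn, pvSpl_go sep hsep (s.length + 1) s [] [] (by omega)]
  obtain ⟨h1, tl, hh, -⟩ := pvSpl_head_aux sep s
  rw [hh]
  simp

-- split?/getD at the Chars level
theorem pvSplit_getD (s : String) :
    (PySem.Str.split? s "\n").getD [] = (pvSpl ['\n'] s.toList).map String.ofList := by
  rw [PySem.Str.split?, PySem.Chars.split?]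
  have : ("\n" : String).toList = ['\n'] := by decide
  rw [this, pvSpl_eq s.toList ['\n'] (by decide)]
  simp

-- the three pause replacements, at the Chars level
def pvRep3 (cs : List Char) : List Char :=
  pvRep ("? ".toList) ("? <break time='0.3s'/> ".toList)
    (pvRep ("! ".toList) ("! <break time='0.3s'/> ".toList)
      (pvRep (". ".toList) (". <break time='0.3s'/> ".toList) cs))

theorem pvReplace3_eq (s : String) :
    PySem.Str.replace (PySem.Str.replace (PySem.Str.replace s ". " ". <break time='0.3s'/> ")
        "! " "! <break time='0.3s'/> ") "? " "? <break time='0.3s'/> "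
      = String.ofList (pvRep3 s.toList) := by
  simp only [PySem.Str.replace, String.toList_ofList]
  rw [pvRep_eq _ (". ".toList) (". <break time='0.3s'/> ".toList) (by decide)]
  rw [pvRep_eq _ ("! ".toList) ("! <break time='0.3s'/> ".toList) (by decide)]
  rw [pvRep_eq _ ("? ".toList) ("? <break time='0.3s'/> ".toList) (by decide)]
  rw [pvRep3]

-- per-line work done by A, as a function of the line (used only in the proof)
def pvOptLine (line : String) : String :=
  let l3 := PySem.Str.replace (PySem.Str.replace (PySem.Str.replace line
      ". " ". <break time='0.3s'/> ") "! " "! <break time='0.3s'/> ") "? " "? <break time='0.3s'/> "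
  if PySem.Str.isIn "?" l3 then "<emphasis level='moderate'>" ++ l3 ++ "</emphasis>" else l3

-- replacing a newline-free pattern commutes with splitting on newlines
theorem pvSpl_append (a b : List Char) (ha : '\n' ∉ a) :
    pvSpl ['\n'] (a ++ b) = (pvSpl ['\n'] b).modifyHead (a ++ ·) := by
  induction a with
  | nil =>
    simp only [List.nil_append]
    obtain ⟨h1, tl, hh, -⟩ := pvSpl_head_aux ['\n'] b
    rw [hh]; simp
  | cons c a ih =>
    have hc : c ≠ '\n' := by simp at ha; tauto
    have ha' : '\n' ∉ a := by simp at ha; tauto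
    rw [List.cons_append, pvSpl]
    have hpre : (['\n'].isPrefixOf (c :: (a ++ b))) = false := by
      simp [List.isPrefixOf]; exact fun hcc => absurd hcc.symm hc
    rw [hpre]
    simp only [Bool.false_eq_true, if_false]
    rw [ih ha']
    obtain ⟨h1, tl, hh, -⟩ := pvSpl_head_aux ['\n'] b
    rw [hh]; simp

theorem pvRep_spl_comm (old new : List Char) (hold : old ≠ [])
    (hno : '\n' ∉ old) (hnn : '\n' ∉ new) :
    ∀ s : List Char, pvSpl ['\n'] (pvRep old new s) = (pvSpl ['\n'] s).map (pvRep old new) := by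
  intro s
  induction s using pvRep.induct old with
  | case1 => simp [pvRep, pvSpl]
  | case2 c t hpre ih =>
    have hpre' : old <+: (c :: t) := List.isPrefixOf_iff_prefix.mp hpre
    have hol : 1 ≤ old.length := by
      cases old with
      | nil => exact absurd rfl hold
      | cons a b => simp
    have hdec : c :: t = old ++ t.drop (old.length - 1) := by
      have h1 : c :: t = old ++ (c :: t).drop old.length := (List.prefix_iff_eq_append.mp hpre').symm
      rw [h1]
      congr 1
      rw [show old.length = (old.length - 1) + 1 from by omega, List.drop_succ_cons]
      simp
    rw [pvRep, if_pos hpre, pvSpl_append _ _ hnn, ih]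
    conv_rhs => rw [hdec]
    rw [pvSpl_append _ _ hno]
    obtain ⟨h1, tl, hh, -⟩ := pvSpl_head_aux ['\n'] (t.drop (old.length - 1))
    rw [hh]
    simp only [List.modifyHead_cons, List.map_cons]
    congr 1
    cases old with
    | nil => exact absurd rfl hold
    | cons o orest =>
      rw [List.cons_append, pvRep]
      have : (o :: orest).isPrefixOf (o :: (orest ++ h1)) = true := by
        rw [List.isPrefixOf_iff_prefix]
        exact ⟨h1, by simp⟩
      rw [if_pos this]
      simp
  | case3 c t hpre ih =>
    rw [pvRep, if_neg hpre]
    by_cases hc : c = '\n'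
    · subst hc
      rw [pvSpl, if_pos (by simp [List.isPrefixOf])]
      rw [pvSpl, if_pos (by simp [List.isPrefixOf])]
      simp only [List.length_cons, List.length_nil, Nat.sub_self, List.drop_zero]
      rw [ih]
      simp [pvRep]
    · have hnp : ∀ x : List Char, (['\n'].isPrefixOf (c :: x)) = false := by
        intro x
        simp [List.isPrefixOf]
        exact fun hcc => absurd hcc.symm hc
      rw [pvSpl, hnp]
      rw [pvSpl, hnp]
      simp only [Bool.false_eq_true, if_false]
      rw [ih]
      obtain ⟨h1, tl, hh, hp⟩ := pvSpl_head_aux ['\n'] t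
      rw [hh]
      simp only [List.map_cons, List.modifyHead_cons]
      congr 1
      rw [pvRep, if_neg (by
        intro hcon
        apply hpre
        rw [List.isPrefixOf_iff_prefix] at hcon ⊢
        exact hcon.trans (List.cons_prefix_cons.mpr ⟨rfl, hp⟩))]

theorem pvSpl_rep3 (cs : List Char) :
    pvSpl ['\n'] (pvRep3 cs) = (pvSpl ['\n'] cs).map pvRep3 := by
  rw [pvRep3]
  rw [pvRep_spl_comm ("? ".toList) ("? <break time='0.3s'/> ".toList) (by decide) (by decide) (by decide)]
  rw [pvRep_spl_comm ("! ".toList) ("! <break time='0.3s'/> ".toList) (by decide) (by decide) (by decide)]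
  rw [pvRep_spl_comm (". ".toList) (". <break time='0.3s'/> ".toList) (by decide) (by decide) (by decide)]
  simp only [List.map_map]
  rfl

-- ---------- one-pass = three-pass, per line ----------

-- one-pass replacement (the pause-insertion part of B's scan, newline ignored)
def pvRep1 : List Char → List Char
  | [] => []
  | c :: t =>
    if (c = '.' ∨ c = '!' ∨ c = '?') ∧ t.head? = some ' ' then
      c :: pvBrk ++ pvRep1 (t.drop 1)
    else c :: pvRep1 t
termination_by l => l.length
decreasing_by
  · simp only [List.length_cons]
    have := List.length_drop (l := t) (i := 1)
    omega
  · simp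

-- unfolding a two-character-pattern pvRep
theorem pvRep_two (x : Char) (ins : List Char) (c : Char) (t : List Char) :
    pvRep [x, ' '] (x :: ins) (c :: t)
      = if c = x ∧ t.head? = some ' ' then (x :: ins) ++ pvRep [x, ' '] (x :: ins) (t.drop 1)
        else c :: pvRep [x, ' '] (x :: ins) t := by
  cases t with
  | nil => simp [pvRep, List.isPrefixOf]
  | cons d t' =>
    by_cases h : c = x ∧ d = ' '
    · obtain ⟨rfl, rfl⟩ := h
      rw [pvRep, if_pos (by simp [List.isPrefixOf]), if_pos ⟨rfl, rfl⟩]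
      rfl
    · have hpre : ¬ ([x, ' '].isPrefixOf (c :: d :: t') = true) := by
        rw [List.isPrefixOf_iff_prefix]
        intro hcon
        obtain ⟨e, he⟩ := hcon
        simp only [List.cons_append, List.cons.injEq] at he
        exact h ⟨he.1.symm, he.2.1.symm⟩
      rw [pvRep, if_neg hpre,
        if_neg (by rintro ⟨h1, h2⟩; simp at h2; exact h ⟨h1, h2⟩)]

-- the head is preserved by a pvRep whose replacement starts with the matched char
theorem pvRep_head (x : Char) (ins : List Char) (l : List Char) :
    (pvRep [x, ' '] (x :: ins) l).head? = l.head? := by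
  cases l with
  | nil => rw [pvRep]
  | cons c t =>
    rw [pvRep_two]
    by_cases h : c = x ∧ t.head? = some ' '
    · rw [if_pos h]; simp [h.1]
    · rw [if_neg h]; simp

-- a pvRep passes over a block not containing its trigger character
theorem pvRep_skip (x : Char) (ins : List Char) (a b : List Char) (ha : x ∉ a) :
    pvRep [x, ' '] (x :: ins) (a ++ b) = a ++ pvRep [x, ' '] (x :: ins) b := by
  induction a with
  | nil => simp
  | cons c a ih =>
    have hc : c ≠ x := by simp at ha; tauto
    have ha' : x ∉ a := by simp at ha; tauto
    rw [List.cons_append, pvRep_two, if_neg (by rintro ⟨h1, -⟩; exact hc h1), ih ha']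
    simp

-- three sequential replaces = the single pass
theorem pvRep3_eq_pvRep1 (l : List Char) : pvRep3 l = pvRep1 l := by
  have hd : (". ".toList) = ['.', ' '] := by decide
  have he : ("! ".toList) = ['!', ' '] := by decide
  have hq : ("? ".toList) = ['?', ' '] := by decide
  have hd2 : (". <break time='0.3s'/> ".toList) = '.' :: pvBrk := by decide
  have he2 : ("! <break time='0.3s'/> ".toList) = '!' :: pvBrk := by decide
  have hq2 : ("? <break time='0.3s'/> ".toList) = '?' :: pvBrk := by decide
  rw [pvRep3, hd, he, hq, hd2, he2, hq2]
  induction l using pvRep1.induct with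
  | case1 => rw [pvRep, pvRep, pvRep, pvRep1]
  | case2 c t hcond ih =>
    obtain ⟨hc, hh⟩ := hcond
    obtain ⟨t', rfl⟩ : ∃ t', t = ' ' :: t' := by
      cases t with
      | nil => simp at hh
      | cons d t' => simp at hh; exact ⟨t', by rw [hh]⟩
    simp only [List.drop_succ_cons, List.drop_zero] at ih ⊢
    rw [pvRep1, if_pos ⟨hc, by simp⟩]
    simp only [List.drop_succ_cons, List.drop_zero]
    rcases hc with rfl | rfl | rfl
    · -- c = '.'
      have s1 : pvRep ['.',' '] ('.'::pvBrk) ('.' :: ' ' :: t')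
          = ('.'::pvBrk) ++ pvRep ['.',' '] ('.'::pvBrk) t' := by
        rw [pvRep_two, if_pos ⟨rfl, rfl⟩]
        rfl
      rw [s1,
        pvRep_skip '!' pvBrk ('.'::pvBrk) _ (by decide),
        pvRep_skip '?' pvBrk ('.'::pvBrk) _ (by decide), ih]
      try simp
    · -- c = '!'
      have a1 : pvRep ['.',' '] ('.'::pvBrk) ('!' :: ' ' :: t')
          = '!' :: pvRep ['.',' '] ('.'::pvBrk) (' ' :: t') := by
        rw [pvRep_two, if_neg (by rintro ⟨h, -⟩; exact absurd h (by decide))]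
      have a2 : pvRep ['.',' '] ('.'::pvBrk) (' ' :: t')
          = ' ' :: pvRep ['.',' '] ('.'::pvBrk) t' := by
        rw [pvRep_two, if_neg (by rintro ⟨h, -⟩; exact absurd h (by decide))]
      have s2 : pvRep ['!',' '] ('!'::pvBrk) ('!' :: ' ' :: pvRep ['.',' '] ('.'::pvBrk) t')
          = ('!'::pvBrk) ++ pvRep ['!',' '] ('!'::pvBrk) (pvRep ['.',' '] ('.'::pvBrk) t') := by
        rw [pvRep_two, if_pos ⟨rfl, rfl⟩]
        rfl
      rw [a1, a2, s2, pvRep_skip '?' pvBrk ('!'::pvBrk) _ (by decide), ih]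
      try simp
    · -- c = '?'
      have a1 : pvRep ['.',' '] ('.'::pvBrk) ('?' :: ' ' :: t')
          = '?' :: pvRep ['.',' '] ('.'::pvBrk) (' ' :: t') := by
        rw [pvRep_two, if_neg (by rintro ⟨h, -⟩; exact absurd h (by decide))]
      have a2 : pvRep ['.',' '] ('.'::pvBrk) (' ' :: t')
          = ' ' :: pvRep ['.',' '] ('.'::pvBrk) t' := by
        rw [pvRep_two, if_neg (by rintro ⟨h, -⟩; exact absurd h (by decide))]
      have b1 : pvRep ['!',' '] ('!'::pvBrk) ('?' :: ' ' :: pvRep ['.',' '] ('.'::pvBrk) t')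
          = '?' :: pvRep ['!',' '] ('!'::pvBrk) (' ' :: pvRep ['.',' '] ('.'::pvBrk) t') := by
        rw [pvRep_two, if_neg (by rintro ⟨h, -⟩; exact absurd h (by decide))]
      have b2 : pvRep ['!',' '] ('!'::pvBrk) (' ' :: pvRep ['.',' '] ('.'::pvBrk) t')
          = ' ' :: pvRep ['!',' '] ('!'::pvBrk) (pvRep ['.',' '] ('.'::pvBrk) t') := by
        rw [pvRep_two, if_neg (by rintro ⟨h, -⟩; exact absurd h (by decide))]
      have c1 : pvRep ['?',' '] ('?'::pvBrk)
            ('?' :: ' ' :: pvRep ['!',' '] ('!'::pvBrk) (pvRep ['.',' '] ('.'::pvBrk) t'))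
          = ('?'::pvBrk) ++ pvRep ['?',' '] ('?'::pvBrk)
            (pvRep ['!',' '] ('!'::pvBrk) (pvRep ['.',' '] ('.'::pvBrk) t')) := by
        rw [pvRep_two, if_pos ⟨rfl, rfl⟩]
        rfl
      rw [a1, a2, b1, b2, c1, ih]
      try simp
  | case3 c t hcond ih =>
    have hnd : ¬ (c = '.' ∧ t.head? = some ' ') := fun ⟨h1, h2⟩ => hcond ⟨Or.inl h1, h2⟩
    have hne : ¬ (c = '!' ∧ t.head? = some ' ') := fun ⟨h1, h2⟩ => hcond ⟨Or.inr (Or.inl h1), h2⟩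
    have hnq : ¬ (c = '?' ∧ t.head? = some ' ') := fun ⟨h1, h2⟩ => hcond ⟨Or.inr (Or.inr h1), h2⟩
    have a1 : pvRep ['.',' '] ('.'::pvBrk) (c :: t) = c :: pvRep ['.',' '] ('.'::pvBrk) t := by
      rw [pvRep_two, if_neg hnd]
    have b1 : pvRep ['!',' '] ('!'::pvBrk) (c :: pvRep ['.',' '] ('.'::pvBrk) t)
        = c :: pvRep ['!',' '] ('!'::pvBrk) (pvRep ['.',' '] ('.'::pvBrk) t) := by
      rw [pvRep_two, if_neg (by rw [pvRep_head]; exact hne)]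
    have c1 : pvRep ['?',' '] ('?'::pvBrk)
          (c :: pvRep ['!',' '] ('!'::pvBrk) (pvRep ['.',' '] ('.'::pvBrk) t))
        = c :: pvRep ['?',' '] ('?'::pvBrk)
          (pvRep ['!',' '] ('!'::pvBrk) (pvRep ['.',' '] ('.'::pvBrk) t)) := by
      rw [pvRep_two, if_neg (by rw [pvRep_head, pvRep_head]; exact hnq)]
    rw [a1, b1, c1, ih, pvRep1, if_neg hcond]

-- the single pass preserves presence of '?'
theorem pvRep1_mem_q (l : List Char) : ('?' ∈ pvRep1 l) ↔ ('?' ∈ l) := by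
  induction l using pvRep1.induct with
  | case1 => simp [pvRep1]
  | case2 c t hcond ih =>
    obtain ⟨hc, hh⟩ := hcond
    obtain ⟨t', rfl⟩ : ∃ t', t = ' ' :: t' := by
      cases t with
      | nil => simp at hh
      | cons d t' => simp at hh; exact ⟨t', by rw [hh]⟩
    simp only [List.drop_succ_cons, List.drop_zero] at ih ⊢
    rw [pvRep1, if_pos ⟨hc, by simp⟩]
    simp only [List.drop_succ_cons, List.drop_zero]
    have hb : '?' ∉ pvBrk := by decide
    simp [List.mem_cons, List.mem_append, ih, hb, (by decide : ('?' : Char) ≠ ' ')]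
  | case3 c t hcond ih =>
    rw [pvRep1, if_neg hcond]
    simp [ih]

-- isIn "?" corresponds to list membership
theorem pvIsIn_q (s : String) : PySem.Str.isIn "?" s = true ↔ '?' ∈ s.toList := by
  rw [PySem.Str.isIn_iff_infix]
  have hql : ("?" : String).toList = ['?'] := by decide
  rw [hql]
  constructor
  · intro h; exact h.subset (by simp)
  · intro h
    obtain ⟨a, b, hab⟩ := List.append_of_mem h
    exact ⟨a, b, by rw [hab]; simp⟩

-- the scan, characterized line by line over the newline split
theorem pvScan_spl (cs buf : List Char) (hq : Bool) :
    ∀ (l : List Char) (rest : List (List Char)), pvSpl ['\n'] cs = l :: rest →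
    pvScan cs buf hq
      = pvFin (buf ++ pvRep1 l) (hq || decide ('?' ∈ l))
        :: rest.map (fun m => pvFin (pvRep1 m) (decide ('?' ∈ m))) := by
  induction cs, buf, hq using pvScan.induct with
  | case1 buf hq =>
    intro l rest hsp
    rw [pvSpl] at hsp
    injection hsp with h1 h2
    subst h2
    rw [pvScan, ← h1]
    simp [pvRep1]
  | case2 t buf hq ih =>
    intro l rest hsp
    rw [pvSpl, if_pos (by simp [List.isPrefixOf])] at hsp
    have hsp2 : ([] : List Char) :: pvSpl ['\n'] t = l :: rest := hsp
    obtain ⟨l', rest', hsp', -⟩ := pvSpl_head_aux ['\n'] t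
    rw [hsp'] at hsp2
    injection hsp2 with h1 h2
    subst h1
    rw [pvScan, if_pos rfl, ih l' rest' hsp', ← h2]
    simp [pvRep1]
  | case3 c t buf hq hc hqp hcond ih =>
    intro l rest hsp
    obtain ⟨hp, hh⟩ := hcond
    obtain ⟨t', rfl⟩ : ∃ t', t = ' ' :: t' := by
      cases t with
      | nil => simp at hh
      | cons d t'' => simp at hh; exact ⟨t'', by rw [hh]⟩
    have hnp : ∀ x : List Char, (['\n'].isPrefixOf (c :: x)) = false := by
      intro x; simp [List.isPrefixOf]; exact fun hcc => absurd hcc.symm hc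
    have hnp2 : (['\n'].isPrefixOf (' ' :: t')) = false := by simp [List.isPrefixOf]
    rw [pvSpl, hnp] at hsp
    simp only [Bool.false_eq_true, if_false] at hsp
    rw [pvSpl, hnp2] at hsp
    simp only [Bool.false_eq_true, if_false] at hsp
    obtain ⟨l', rest', hsp', -⟩ := pvSpl_head_aux ['\n'] t'
    rw [hsp'] at hsp
    simp only [List.modifyHead_cons] at hsp
    injection hsp with h1 h2
    subst h2
    have ih' : ∀ (l : List Char) (rest : List (List Char)), pvSpl ['\n'] t' = l :: rest →
        pvScan t' (buf ++ c :: pvBrk) (hq || decide (c = '?'))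
          = pvFin ((buf ++ c :: pvBrk) ++ pvRep1 l) ((hq || decide (c = '?')) || decide ('?' ∈ l))
            :: rest.map (fun m => pvFin (pvRep1 m) (decide ('?' ∈ m))) := ih
    simp only [pvScan]
    rw [if_neg hc, if_pos ⟨hp, rfl⟩]
    simp only [List.drop_succ_cons, List.drop_zero]
    rw [ih' l' rest' hsp', ← h1]
    have hrep : pvRep1 (c :: ' ' :: l') = c :: pvBrk ++ pvRep1 l' := by
      rw [pvRep1, if_pos ⟨hp, rfl⟩]
      simp
    rw [hrep]
    congr 2
    · simp
    · cases hq <;> by_cases hcq : c = '?'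
      · subst hcq; simp
      · simp [List.mem_cons, hcq, (show ¬ (('?' : Char) = c) from fun h => hcq h.symm)]
      · subst hcq; simp
      · simp [List.mem_cons, hcq, (show ¬ (('?' : Char) = c) from fun h => hcq h.symm)]
  | case4 c t buf hq hc hqp hcond ih =>
    intro l rest hsp
    have hnp : ∀ x : List Char, (['\n'].isPrefixOf (c :: x)) = false := by
      intro x; simp [List.isPrefixOf]; exact fun hcc => absurd hcc.symm hc
    rw [pvSpl, hnp] at hsp
    simp only [Bool.false_eq_true, if_false] at hsp
    obtain ⟨l', rest', hsp', hpre⟩ := pvSpl_head_aux ['\n'] t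
    rw [hsp'] at hsp
    simp only [List.modifyHead_cons] at hsp
    injection hsp with h1 h2
    subst h2
    have ih' : ∀ (l : List Char) (rest : List (List Char)), pvSpl ['\n'] t = l :: rest →
        pvScan t (buf ++ [c]) (hq || decide (c = '?'))
          = pvFin ((buf ++ [c]) ++ pvRep1 l) ((hq || decide (c = '?')) || decide ('?' ∈ l))
            :: rest.map (fun m => pvFin (pvRep1 m) (decide ('?' ∈ m))) := ih
    simp only [pvScan]
    rw [if_neg hc, if_neg hcond]
    rw [ih' l' rest' hsp', ← h1]
    have hrep : pvRep1 (c :: l') = c :: pvRep1 l' := by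
      rw [pvRep1, if_neg (by
        rintro ⟨hpc, hhl⟩
        apply hcond
        refine ⟨hpc, ?_⟩
        obtain ⟨e, he⟩ := hpre
        rw [← he]
        cases l' with
        | nil => simp at hhl
        | cons d l'' =>
          simp at hhl
          subst hhl
          rfl)]
    rw [hrep]
    congr 2
    · simp
    · cases hq <;> by_cases hcq : c = '?'
      · subst hcq; simp
      · simp [List.mem_cons, hcq, (show ¬ (('?' : Char) = c) from fun h => hcq h.symm)]
      · subst hcq; simp
      · simp [List.mem_cons, hcq, (show ¬ (('?' : Char) = c) from fun h => hcq h.symm)]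

-- ===== VERDICT (by name: the statement is the Claim_ definition above) =====
set_option maxHeartbeats 1000000 in
theorem optimize_script_for_tts_spec : Claim_equal_optimize_script_for_tts := by
  intro script _
  unfold Spec_optimize_script_for_tts optimize_script_for_tts optimize_script_for_tts_alt
  simp only []
  obtain ⟨l, rest, hsp, -⟩ := pvSpl_head_aux ['\n'] script.toList
  have hA :
      ((PySem.Str.split? (PySem.Str.replace (PySem.Str.replace (PySem.Str.replace script
              ". " ". <break time='0.3s'/> ") "! " "! <break time='0.3s'/> ")
              "? " "? <break time='0.3s'/> ") "\n").getD [])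
        = (pvSpl ['\n'] script.toList).map (fun m => String.ofList (pvRep3 m)) := by
    rw [pvReplace3_eq, pvSplit_getD, String.toList_ofList, pvSpl_rep3]
    simp [List.map_map, Function.comp]
  have hLine : ∀ m : List Char,
      (if PySem.Str.isIn "?" (String.ofList (pvRep3 m))
        then "<emphasis level='moderate'>" ++ String.ofList (pvRep3 m) ++ "</emphasis>"
        else String.ofList (pvRep3 m))
        = pvFin (pvRep1 m) (decide ('?' ∈ m)) := by
    intro m
    rw [pvRep3_eq_pvRep1, pvFin]
    by_cases hq : '?' ∈ m
    · rw [if_pos ((pvIsIn_q _).mpr (by rw [String.toList_ofList, pvRep1_mem_q]; exact hq)),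
        if_pos (by simp [hq])]
    · rw [if_neg (by rw [pvIsIn_q, String.toList_ofList, pvRep1_mem_q]; exact hq),
        if_neg (by simp [hq])]
  have hLines :
      (((pvSpl ['\n'] script.toList).map (fun m => String.ofList (pvRep3 m))).map (fun line =>
          if PySem.Str.isIn "?" line then "<emphasis level='moderate'>" ++ line ++ "</emphasis>"
          else line))
        = pvScan script.toList [] false := by
    rw [pvScan_spl script.toList [] false l rest hsp, hsp]
    simp only [List.map_cons, List.map_map, List.nil_append, Bool.false_or]
    rw [hLine l]
    exact congrArg (pvFin (pvRep1 l) (decide ('?' ∈ l)) :: ·)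
      (List.map_congr_left fun m _ => hLine m)
  rw [hA, hLines]
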